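-- pv_equiv track=rewrite | github.com/CodeFusionAgent/codefusion | cf/agents/react_code_architecture_agent.py | _is_source_code_file
-- ===== SOURCE A (Python) =====
-- def _is_source_code_file(file_path: str) -> bool:
--     """Check if a file is source code."""
--     source_extensions = [
--         '.py', '.js', '.ts', '.tsx', '.jsx',
--         '.java', '.c', '.cpp', '.cc', '.cxx',
--         '.h', '.hpp', '.go', '.rs', '.kt',
--         '.swift', '.php', '.rb', '.scala',
--         '.cs', '.vb', '.clj', '.hs', '.ml'
--     ]
--     return any(file_path.lower().endswith(ext) for ext in source_extensions)
-- ===== SOURCE B (Python) =====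
-- _SOURCE_EXTS = frozenset({
--     '.py', '.js', '.ts', '.tsx', '.jsx',
--     '.java', '.c', '.cpp', '.cc', '.cxx',
--     '.h', '.hpp', '.go', '.rs', '.kt',
--     '.swift', '.php', '.rb', '.scala',
--     '.cs', '.vb', '.clj', '.hs', '.ml',
-- })
--
--
-- def _is_source_code_file(file_path: str) -> bool:
--     """Check if a file is source code."""
--     parts = file_path.lower().rsplit('.', 1)
--     if len(parts) == 1:
--         return False
--     return '.' + parts[1] in _SOURCE_EXTS
-- ===== Notes on version B (the rewrite author's own statement) =====
-- stated objective: idiomatic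
-- what changed: B lowercases the path, extracts the extension once by splitting at the last dot (rsplit with maxsplit 1), and does a single frozenset membership test, instead of A's scan running endswith against all 24 extensions.
import Mathlib
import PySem

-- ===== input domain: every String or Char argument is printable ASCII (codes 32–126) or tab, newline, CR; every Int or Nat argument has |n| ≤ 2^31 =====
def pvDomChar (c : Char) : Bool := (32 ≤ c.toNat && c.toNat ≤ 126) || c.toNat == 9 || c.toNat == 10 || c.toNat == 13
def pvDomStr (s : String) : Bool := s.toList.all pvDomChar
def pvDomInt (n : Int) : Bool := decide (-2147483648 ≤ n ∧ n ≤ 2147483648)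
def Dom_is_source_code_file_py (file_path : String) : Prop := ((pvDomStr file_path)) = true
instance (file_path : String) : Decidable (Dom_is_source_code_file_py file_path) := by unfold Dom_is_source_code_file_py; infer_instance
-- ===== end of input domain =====

-- B extracts the lowercased path's extension once (split at the last '.') and does a single
-- set-membership test instead of A's scan of 24 endswith checks; objective: idiomatic.

-- ===== PORT A =====
def pvSourceExtensions : List String :=
  [".py", ".js", ".ts", ".tsx", ".jsx",
   ".java", ".c", ".cpp", ".cc", ".cxx",
   ".h", ".hpp", ".go", ".rs", ".kt",
   ".swift", ".php", ".rb", ".scala",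
   ".cs", ".vb", ".clj", ".hs", ".ml"]

def is_source_code_file_py (file_path : String) : Bool :=
  pvSourceExtensions.any (fun ext => PySem.Str.endswith (PySem.Str.lower file_path) ext)

-- ===== PORT B =====
-- Source B's frozenset of source extensions, as code-point lists (distinct elements)
def pvSrcExtSet : List (List Char) :=
  [['.','p','y'], ['.','j','s'], ['.','t','s'], ['.','t','s','x'], ['.','j','s','x'],
   ['.','j','a','v','a'], ['.','c'], ['.','c','p','p'], ['.','c','c'], ['.','c','x','x'],
   ['.','h'], ['.','h','p','p'], ['.','g','o'], ['.','r','s'], ['.','k','t'],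
   ['.','s','w','i','f','t'], ['.','p','h','p'], ['.','r','b'], ['.','s','c','a','l','a'],
   ['.','c','s'], ['.','v','b'], ['.','c','l','j'], ['.','h','s'], ['.','m','l']]

-- rsplit('.', 1) ported exactly on the code-point list: the part after the LAST '.' is found by
-- scanning the reversed list; `rest = []` ↔ no '.' ↔ Python's rsplit returned a single part.
def is_source_code_file_py_alt (file_path : String) : Bool :=
  let rev := (PySem.Str.lower file_path).toList.reverse
  let seg := rev.takeWhile (fun c => c != '.')   -- parts[1], reversed
  let rest := rev.dropWhile (fun c => c != '.')
  if rest.isEmpty then false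
  else pvSrcExtSet.contains ('.' :: seg.reverse)  -- '.' + parts[1] in _SOURCE_EXTS

-- ===== PRECONDITION & SPEC =====
def Spec_is_source_code_file_py (file_path : String) (out : Bool) : Prop := out = is_source_code_file_py_alt file_path
instance (file_path : String) (out : Bool) : Decidable (Spec_is_source_code_file_py file_path out) := by unfold Spec_is_source_code_file_py; infer_instance

-- ===== CLAIM (what is proved, stated in full; the proofs are below) =====
def Claim_equal_is_source_code_file_py : Prop := ∀ (file_path : String), Dom_is_source_code_file_py file_path → Spec_is_source_code_file_py file_path (is_source_code_file_py file_path)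

-- ===== LEMMAS AND PROOFS =====

-- a dot-free block followed by '.' is a prefix of r iff the scan to the first '.' in r yields exactly that block
theorem pv_dotfree_prefix (t : List Char) (ht : ∀ c ∈ t, c ≠ '.') (r : List Char) :
    (t ++ ['.'] <+: r) ↔
      (r.takeWhile (fun c => c != '.') = t ∧ r.dropWhile (fun c => c != '.') ≠ []) := by
  induction t generalizing r with
  | nil =>
    cases r with
    | nil => simp
    | cons c r' =>
      by_cases hc : c = '.'
      · subst hc; simp
      · simp [List.cons_prefix_cons, hc, Ne.symm hc]
  | cons a t' ih =>
    have ha : a ≠ '.' := ht a (by simp)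
    cases r with
    | nil => simp
    | cons c r' =>
      by_cases hc : c = a
      · subst hc
        simp [List.cons_prefix_cons, ha,
              ih (fun c hcm => ht c (by simp [hcm]))]
      · constructor
        · intro h
          exact absurd (List.cons_prefix_cons.mp h).1 (Ne.symm hc)
        · rintro ⟨h1, -⟩
          by_cases hcd : c = '.'
          · simp [hcd] at h1
          · simp [hcd] at h1
            exact absurd h1.1 hc

-- endswith with a '.'-headed dot-free extension, characterised by the last-dot scan
theorem pv_endswith_ext (l t : List Char) (ht : ∀ c ∈ t, c ≠ '.') :
    PySem.Chars.endswith l ('.' :: t) = true ↔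
      (l.reverse.takeWhile (fun c => c != '.') = t.reverse ∧
       l.reverse.dropWhile (fun c => c != '.') ≠ []) := by
  rw [PySem.Chars.endswith_iff, ← List.reverse_prefix]
  have h : ('.' :: t).reverse = t.reverse ++ ['.'] := by simp
  rw [h, pv_dotfree_prefix t.reverse (fun c hc => ht c (List.mem_reverse.mp hc))]

-- every element of the extension set is '.' followed by a dot-free tail
theorem pv_ext_shape (e : List Char) (he : e ∈ pvSrcExtSet) :
    ∃ t, e = '.' :: t ∧ ∀ c ∈ t, c ≠ '.' := by
  have hall : pvSrcExtSet.all
      (fun e => !e.isEmpty && (e.headI == '.') && e.tail.all (fun c => c != '.')) = true := by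
    decide
  have h := List.all_eq_true.mp hall e he
  cases e with
  | nil => simp at h
  | cons a t =>
    simp only [List.headI, List.tail_cons, Bool.and_eq_true, beq_iff_eq, List.all_eq_true] at h
    refine ⟨t, by rw [h.1.2], fun c hc => ?_⟩
    simpa using h.2 c hc

-- a member of the set equal to '.' + reversed last segment is a suffix of l
theorem pv_mem_endswith (l e : List Char) (he : e ∈ pvSrcExtSet)
    (h1 : ('.' :: (l.reverse.takeWhile (fun c => c != '.')).reverse) = e)
    (hr : l.reverse.dropWhile (fun c => c != '.') ≠ []) :
    PySem.Chars.endswith l e = true := by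
  obtain ⟨t, rfl, ht⟩ := pv_ext_shape e he
  rw [pv_endswith_ext l t ht]
  simp only [List.cons.injEq, true_and] at h1
  exact ⟨List.reverse_eq_iff.mp h1, hr⟩

-- the core equality, on an arbitrary code-point list
theorem pv_main (l : List Char) :
    (pvSourceExtensions.any fun e => PySem.Chars.endswith l e.toList) =
    (if (l.reverse.dropWhile (fun c => c != '.')).isEmpty then false
     else pvSrcExtSet.contains ('.' :: (l.reverse.takeWhile (fun c => c != '.')).reverse)) := by
  have hconv : (pvSourceExtensions.any fun e => PySem.Chars.endswith l e.toList) =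
      (pvSrcExtSet.any fun e => PySem.Chars.endswith l e) := rfl
  rw [hconv, Bool.eq_iff_iff]
  by_cases hr : (l.reverse.dropWhile (fun c => c != '.')) = []
  · simp only [hr, List.isEmpty_nil, if_true, List.any_eq_true]
    constructor
    · rintro ⟨e, he, hend⟩
      obtain ⟨t, rfl, ht⟩ := pv_ext_shape e he
      rw [pv_endswith_ext l t ht] at hend
      exact absurd hr hend.2
    · simp
  · simp only [List.isEmpty_iff, hr, if_false, List.any_eq_true, List.contains_eq_mem,
      decide_eq_true_eq]
    constructor
    · rintro ⟨e, he, hend⟩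
      obtain ⟨t, rfl, ht⟩ := pv_ext_shape e he
      rw [pv_endswith_ext l t ht] at hend
      have h2 : (l.reverse.takeWhile (fun c => c != '.')).reverse = t := by
        rw [hend.1, List.reverse_reverse]
      rw [h2]; exact he
    · intro h
      exact ⟨_, h, pv_mem_endswith l _ h rfl hr⟩

-- ===== VERDICT (by name: the statement is the Claim_ definition above) =====
theorem is_source_code_file_py_spec : Claim_equal_is_source_code_file_py := by
  intro file_path _
  show _ = _
  unfold is_source_code_file_py is_source_code_file_py_alt
  simp only [PySem.Str.endswith_eq]
  exact pv_main (PySem.Str.lower file_path).toList
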